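-- pv_equiv track=rewrite | github.com/Aphoh/wrist | src/sample_model/simulate.py | lists_from_primes_gen
-- ===== SOURCE A (Python) =====
-- from collections import Counter
-- from typing import List, Iterator, Tuple
--
-- def lists_from_primes_gen(nums: List[int], d: int) -> Iterator[List[int]]:
--     """
--     Yield, without duplicates, every length‑d list whose ordered
--     elements are products of disjoint subsets of `nums`.
--     Empty subsets are allowed (slot = 1).
--     """
--     if d <= 0:
--         raise ValueError("d must be positive")
--
--     primes = list(Counter(nums).items())  # (prime, multiplicity)
--     out = [1] * d  # current partial result
--
--     def dfs(i: int):
--         if i == len(primes):  # all primes placed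
--             yield out.copy()
--             return
--
--         p, c = primes[i]  # distribute c copies of p
--         comp = [0] * d  # composition of c into d parts
--
--         def comp_rec(pos: int, remaining: int):
--             if pos == d - 1:  # last slot gets the rest
--                 comp[pos] = remaining
--                 for k in range(d):  # apply
--                     if comp[k]:
--                         out[k] *= p ** comp[k]
--                 yield from dfs(i + 1)
--                 for k in range(d):  # back‑track
--                     if comp[k]:
--                         out[k] //= p ** comp[k]
--                 return
--
--             for cnt in range(remaining + 1):
--                 comp[pos] = cnt
--                 yield from comp_rec(pos + 1, remaining - cnt)
--
--         yield from comp_rec(0, c)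
--
--     yield from dfs(0)
-- ===== SOURCE B (Python) =====
-- from collections import Counter
--
--
-- def lists_from_primes_gen(nums, d):
--     if d <= 0:
--         raise ValueError("d must be positive")
--
--     def comps(c, w):
--         # weak compositions of c into w parts, in lexicographic order
--         partial = [([], c)]  # (prefix, remaining)
--         for _ in range(w - 1):
--             partial = [(pre + [j], rem - j)
--                        for pre, rem in partial for j in range(rem + 1)]
--         return [pre + [rem] for pre, rem in partial]
--
--     primes = list(Counter(nums).items())
--     tables = [comps(c, d) for _, c in primes]
--     choices = [[]]  # cartesian product; earlier primes vary slowest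
--     for t in tables:
--         choices = [ch + [comp] for ch in choices for comp in t]
--     for choice in choices:
--         out = [1] * d
--         for (p, _), comp in zip(primes, choice):
--             for k in range(d):
--                 out[k] *= p ** comp[k]
--         yield out
-- ===== Notes on version B (the rewrite author's own statement) =====
-- stated objective: idiomatic
-- what changed: Replaces the backtracking DFS over a shared mutable output list (multiply in, yield, floor-divide back out) with precomputed per-prime lists of weak compositions combined by a cartesian product, each output list built fresh by pure multiplication; Pre_ excludes only the inputs where A raises (d <= 0 ValueError, 0 in nums ZeroDivisionError while back-tracking).
import Mathlib
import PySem

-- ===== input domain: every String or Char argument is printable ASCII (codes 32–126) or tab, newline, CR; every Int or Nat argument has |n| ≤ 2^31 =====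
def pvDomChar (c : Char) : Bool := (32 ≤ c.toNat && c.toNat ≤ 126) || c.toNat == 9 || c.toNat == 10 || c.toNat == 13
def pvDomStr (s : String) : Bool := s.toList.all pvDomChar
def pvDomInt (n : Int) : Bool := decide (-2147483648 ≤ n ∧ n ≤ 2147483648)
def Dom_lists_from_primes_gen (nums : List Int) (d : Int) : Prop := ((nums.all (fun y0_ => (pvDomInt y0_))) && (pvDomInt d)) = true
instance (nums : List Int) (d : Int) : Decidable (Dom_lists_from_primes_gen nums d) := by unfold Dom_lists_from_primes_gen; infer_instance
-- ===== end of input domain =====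

-- B replaces A's backtracking DFS over one shared mutable output list with per-prime
-- weak-composition tables combined by a cartesian product (objective: idiomatic).

-- ===== PORT A =====
-- 'for k in range(d): if comp[k]: out[k] *= p ** comp[k]'  (d = len(out) = len(comp); the
-- obvious simultaneous structural recursion over out and comp visits the same slots in order)
def applyComp (p : Int) : List Int → List Int → List Int
  | o :: os, c :: cs => (if c ≠ 0 then o * p ^ c.toNat else o) :: applyComp p os cs
  | os, _ => os

-- the back-track loop 'for k in range(d): if comp[k]: out[k] //= p ** comp[k]'
def unapplyComp (p : Int) : List Int → List Int → List Int
  | o :: os, c :: cs => (if c ≠ 0 then PySem.Int.floordiv o (p ^ c.toNat) else o) :: unapplyComp p os cs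
  | os, _ => os

-- dfsA i ~ dfs(i) (the suffix of primes from i); compRecA ~ comp_rec(pos, remaining): `pre` is
-- comp[0:pos] (entries above pos are dead until overwritten), slots = d - pos; the mutable `out`
-- is threaded as state and each call returns (yielded lists, out after the call).
mutual
def dfsA (d : Nat) : List (Int × Int) → List Int → List (List Int) × List Int
  | [], out => ([out], out)
  | (p, c) :: rest, out => compRecA d rest p d [] c out
termination_by primes _ => (primes.length, 0)
def compRecA (d : Nat) (rest : List (Int × Int)) (p : Int) :
    Nat → List Int → Int → List Int → List (List Int) × List Int
  | 0, _, _, out => ([], out)   -- unreachable: slots starts at d ≥ 1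
  | 1, pre, rem, out =>
      let comp := pre ++ [rem]
      let out1 := applyComp p out comp
      let r := dfsA d rest out1
      (r.1, unapplyComp p r.2 comp)
  | n + 2, pre, rem, out =>
      (PySem.List.pyRange 0 (rem + 1) 1).foldl
        (fun acc cnt =>
          let r := compRecA d rest p (n + 1) (pre ++ [cnt]) (rem - cnt) acc.2
          (acc.1 ++ r.1, r.2))
        ([], out)
termination_by slots _ _ _ => (rest.length, slots)
end

def lists_from_primes_gen (nums : List Int) (d : Int) : List (List Int) :=
  if d ≤ 0 then []   -- Python raises ValueError here (outside Pre_)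
  else (dfsA d.toNat (PySem.Dict.counter nums).items (List.replicate d.toNat 1)).1

-- ===== PORT B =====
-- comps(c, w): weak compositions of c into w parts, in lexicographic order, built
-- iteratively slot by slot ('partial' holds (prefix, remaining) pairs; last slot = remainder);
-- stepC is the loop body '[(pre + [j], rem - j) for pre, rem in partial for j in range(rem + 1)]'
def stepC (ps : List (List Int × Int)) : List (List Int × Int) :=
  ps.flatMap (fun pr => (PySem.List.pyRange 0 (pr.2 + 1) 1).map (fun j => (pr.1 ++ [j], pr.2 - j)))

def compsB (c : Int) (w : Nat) : List (List Int) :=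
  ((List.range (w - 1)).foldl (fun part _ => stepC part) [([], c)]).map
    (fun pr => pr.1 ++ [pr.2])

-- 'for k in range(d): out[k] *= p ** comp[k]'
def mulComp (p : Int) : List Int → List Int → List Int
  | o :: os, c :: cs => (o * p ^ c.toNat) :: mulComp p os cs
  | os, _ => os

def lists_from_primes_gen_alt (nums : List Int) (d : Int) : List (List Int) :=
  if d ≤ 0 then []   -- Python raises ValueError here (outside Pre_)
  else
    let primes := (PySem.Dict.counter nums).items
    let tables := primes.map (fun pc => compsB pc.2 d.toNat)
    let choices := tables.foldl
      (fun chs t => chs.flatMap (fun ch => t.map (fun comp => ch ++ [comp]))) [[]]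
    choices.map (fun choice =>
      (primes.zip choice).foldl (fun out pcc => mulComp pcc.1.1 out pcc.2)
        (List.replicate d.toNat 1))

-- ===== PRECONDITION & SPEC =====
-- Pre_ excludes exactly the inputs where A raises: d ≤ 0 (ValueError) and 0 ∈ nums
-- (ZeroDivisionError while back-tracking, it floor-divides by 0 ** k).
def Pre_lists_from_primes_gen (nums : List Int) (d : Int) : Prop := 0 < d ∧ 0 ∉ nums
instance (nums : List Int) (d : Int) : Decidable (Pre_lists_from_primes_gen nums d) := by
  unfold Pre_lists_from_primes_gen; infer_instance

def pvWitness_lists_from_primes_gen : List Int × Int := ([2, 3, 2], 2)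

def Spec_lists_from_primes_gen (nums : List Int) (d : Int) (out : List (List Int)) : Prop := out = lists_from_primes_gen_alt nums d
instance (nums : List Int) (d : Int) (out : List (List Int)) : Decidable (Spec_lists_from_primes_gen nums d out) := by unfold Spec_lists_from_primes_gen; infer_instance

-- ===== CLAIM (what is proved, stated in full; the proofs are below) =====
def Claim_equal_lists_from_primes_gen : Prop := ∀ (nums : List Int) (d : Int), Dom_lists_from_primes_gen nums d → Pre_lists_from_primes_gen nums d → Spec_lists_from_primes_gen nums d (lists_from_primes_gen nums d)

-- ===== LEMMAS AND PROOFS =====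

-- proof-side spec of the composition lists: compositions of c into `slots` parts, first
-- coordinate counted up, recursion on the number of slots (never used with slots = 0)
def compsR : Int → Nat → List (List Int)
  | _, 0 => []
  | c, 1 => [[c]]
  | c, n + 2 => (PySem.List.pyRange 0 (c + 1) 1).flatMap
      (fun j => (compsR (c - j) (n + 1)).map (j :: ·))

-- the n-fold iterate of stepC (the loop 'for _ in range(w - 1)')
def iterC : Nat → List (List Int × Int) → List (List Int × Int)
  | 0, s => s
  | n + 1, s => iterC n (stepC s)

lemma iterC_nil : ∀ (n : Nat), iterC n ([] : List (List Int × Int)) = [] := by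
  intro n
  induction n with
  | zero => rfl
  | succ m ih => exact ih

lemma iterC_succ' : ∀ (n : Nat) (s : List (List Int × Int)), iterC (n + 1) s = stepC (iterC n s) := by
  intro n
  induction n with
  | zero => intro s; rfl
  | succ m ih => intro s; exact ih (stepC s)

lemma foldl_range_iterC : ∀ (n : Nat) (s : List (List Int × Int)),
    (List.range n).foldl (fun part _ => stepC part) s = iterC n s := by
  intro n
  induction n with
  | zero => intro s; rfl
  | succ m ih =>
    intro s
    rw [List.range_succ, List.foldl_append, ih, List.foldl_cons, List.foldl_nil, ← iterC_succ']

lemma iterC_append : ∀ (n : Nat) (p q : List (List Int × Int)),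
    iterC n (p ++ q) = iterC n p ++ iterC n q := by
  intro n
  induction n with
  | zero => intro p q; rfl
  | succ m ih =>
    intro p q
    show iterC m (stepC (p ++ q)) = _
    rw [show stepC (p ++ q) = stepC p ++ stepC q from List.flatMap_append, ih]
    rfl

lemma iterC_map (n : Nat) (l : List Int) (f : Int → List Int × Int) :
    iterC n (l.map f) = l.flatMap (fun x => iterC n [f x]) := by
  induction l with
  | nil => simp [iterC_nil]
  | cons x xs ih =>
    rw [List.map_cons, List.flatMap_cons, show (f x :: xs.map f) = [f x] ++ xs.map f from rfl,
      iterC_append, ih]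

lemma stepC_prefix (p0 : List Int) (s : List (List Int × Int)) :
    stepC (s.map (fun pr => (p0 ++ pr.1, pr.2))) = (stepC s).map (fun pr => (p0 ++ pr.1, pr.2)) := by
  simp only [stepC, List.flatMap_map, List.map_flatMap]
  congr 1
  funext pr
  simp [List.map_map, Function.comp_def, List.append_assoc]

lemma iterC_prefix : ∀ (n : Nat) (p0 : List Int) (s : List (List Int × Int)),
    iterC n (s.map (fun pr => (p0 ++ pr.1, pr.2))) = (iterC n s).map (fun pr => (p0 ++ pr.1, pr.2)) := by
  intro n
  induction n with
  | zero => intro p0 s; rfl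
  | succ m ih =>
    intro p0 s
    show iterC m (stepC (s.map _)) = _
    rw [stepC_prefix, ih]
    rfl

-- B's iterative slot-by-slot table equals the recursive enumeration
lemma iterC_eq_compsR : ∀ (n : Nat) (c : Int),
    (iterC n [([], c)]).map (fun pr => pr.1 ++ [pr.2]) = compsR c (n + 1) := by
  intro n
  induction n with
  | zero => intro c; rfl
  | succ m ih =>
    intro c
    show (iterC m (stepC [([], c)])).map _ = _
    have hstep : stepC [([], c)] = (PySem.List.pyRange 0 (c + 1) 1).map (fun j => ([j], c - j)) := by
      simp [stepC]
    rw [hstep, iterC_map]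
    have hj : ∀ j : Int, iterC m [([j], c - j)]
        = (iterC m [([], c - j)]).map (fun pr => ([j] ++ pr.1, pr.2)) := by
      intro j
      have := iterC_prefix m [j] [([], c - j)]
      simpa using this
    rw [List.map_flatMap]
    show _ = compsR c (m + 2)
    rw [compsR, List.flatMap_def, List.flatMap_def]
    congr 1
    refine List.map_congr_left fun j _ => ?_
    rw [hj j, List.map_map, ← ih (c - j), List.map_map]
    rfl

lemma compsB_eq_compsR (c : Int) (w : Nat) (hw : 1 ≤ w) : compsB c w = compsR c w := by
  unfold compsB
  rw [foldl_range_iterC]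
  have := iterC_eq_compsR (w - 1) c
  rwa [show w - 1 + 1 = w by omega] at this

-- proof-side cartesian product (first list varies slowest)
def cartProd : List (List (List Int)) → List (List (List Int))
  | [] => [[]]
  | t :: ts => t.flatMap (fun x => (cartProd ts).map (x :: ·))

-- A's conditional multiply equals B's unconditional one (p ^ 0 = 1)
lemma applyComp_eq_mulComp (p : Int) : ∀ (os cs : List Int), applyComp p os cs = mulComp p os cs := by
  intro os
  induction os with
  | nil => intro cs; cases cs <;> rfl
  | cons o os ih =>
    intro cs
    cases cs with
    | nil => rfl
    | cons c cs =>
      simp only [applyComp, mulComp, ih]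
      by_cases hc : c = 0 <;> simp [hc]

lemma unapply_apply (p : Int) (hp : p ≠ 0) :
    ∀ (os cs : List Int), unapplyComp p (applyComp p os cs) cs = os := by
  intro os
  induction os with
  | nil => intro cs; cases cs <;> rfl
  | cons o os ih =>
    intro cs
    cases cs with
    | nil => rfl
    | cons c cs =>
      simp only [applyComp, unapplyComp, ih]
      by_cases hc : c = 0
      · simp [hc]
      · have hpow : p ^ c.toNat ≠ 0 := pow_ne_zero _ hp
        have hfd : PySem.Int.floordiv (o * p ^ c.toNat) (p ^ c.toNat) = o := by
          have h := PySem.Int.floordiv_mul_add_mod (o * p ^ c.toNat) (p ^ c.toNat)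
          have hmod : PySem.Int.mod (o * p ^ c.toNat) (p ^ c.toNat) = 0 := by
            rw [PySem.Int.mod_eq_zero_iff_dvd]; exact ⟨o, mul_comm o _⟩
          rw [hmod, add_zero] at h
          exact mul_right_cancel₀ hpow h
        simp [hc, hfd]

-- a fold that appends yields while its state component is restored to `out` by every step
lemma foldl_thread (l : List Int) (g : Int → List Int → List (List Int)) (out : List Int)
    (f : List (List Int) × List Int → Int → List (List Int) × List Int)
    (hf : ∀ acc cnt, cnt ∈ l → f acc cnt = (acc.1 ++ g cnt acc.2, acc.2)) :
    ∀ a0, l.foldl f (a0, out) = (a0 ++ l.flatMap (fun cnt => g cnt out), out) := by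
  induction l with
  | nil => intro a0; simp
  | cons x xs ih =>
    intro a0
    simp only [List.foldl_cons, hf (a0, out) x (by simp)]
    rw [ih (fun acc cnt hm => hf acc cnt (by simp [hm]))]
    simp

-- the value B computes for a given suffix of primes, starting from partial output `out`
def Bmap (d : Nat) (primes : List (Int × Int)) (out : List Int) : List (List Int) :=
  (cartProd (primes.map (fun pc => compsR pc.2 d))).map
    (fun choice => (primes.zip choice).foldl (fun o pcc => applyComp pcc.1.1 o pcc.2) out)

lemma compRec_char (d : Nat) (rest : List (Int × Int)) (p : Int) (hp : p ≠ 0)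
    (hdfs : ∀ o, dfsA d rest o = (Bmap d rest o, o)) :
    ∀ slots, 1 ≤ slots → ∀ pre rem out,
      compRecA d rest p slots pre rem out
        = ((compsR rem slots).flatMap (fun comp => Bmap d rest (applyComp p out (pre ++ comp))), out) := by
  intro slots
  induction slots with
  | zero => omega
  | succ n ih =>
    intro _ pre rem out
    match n with
    | 0 =>
      show compRecA d rest p 1 pre rem out = _
      rw [compRecA]
      simp only [hdfs, unapply_apply p hp, compsR, List.flatMap_cons,
        List.flatMap_nil, List.append_nil]
    | m + 1 =>
      show compRecA d rest p (m + 2) pre rem out = _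
      rw [compRecA]
      rw [foldl_thread _ (fun cnt o =>
            (compsR (rem - cnt) (m + 1)).flatMap
              (fun comp => Bmap d rest (applyComp p o ((pre ++ [cnt]) ++ comp))))
          out _ (fun acc cnt _ => by rw [ih (by omega) (pre ++ [cnt]) (rem - cnt) acc.2]) []]
      simp only [List.nil_append, compsR, List.flatMap_assoc, List.flatMap_map]
      simp only [List.append_assoc, List.singleton_append]

lemma dfs_char (d : Nat) (hd : 1 ≤ d) :
    ∀ primes : List (Int × Int), (∀ pc ∈ primes, pc.1 ≠ 0) → ∀ out,
      dfsA d primes out = (Bmap d primes out, out) := by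
  intro primes
  induction primes with
  | nil =>
    intro _ out
    simp [dfsA, Bmap, cartProd]
  | cons pc rest ih =>
    intro hall out
    obtain ⟨p, c⟩ := pc
    have hp : p ≠ 0 := hall (p, c) (by simp)
    have hrest : ∀ q ∈ rest, q.1 ≠ 0 := fun q hq => hall q (by simp [hq])
    rw [dfsA, compRec_char d rest p hp (ih hrest) d hd [] c out]
    simp only [List.nil_append, Bmap, List.map_cons, cartProd, List.map_flatMap,
      List.map_map]
    simp only [Function.comp_def, List.zip_cons_cons, List.foldl_cons]

-- B's iterative product fold builds exactly cartProd
lemma prod_fold (step : List (List (List Int)) → List (List Int) → List (List (List Int)))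
    (hstep : ∀ chs t, step chs t = chs.flatMap (fun ch => t.map (fun comp => ch ++ [comp]))) :
    ∀ (tables : List (List (List Int))) (acc : List (List (List Int))),
      tables.foldl step acc = acc.flatMap (fun pre => (cartProd tables).map (fun ch => pre ++ ch)) := by
  intro tables
  induction tables with
  | nil => intro acc; simp [cartProd]
  | cons t ts ih =>
    intro acc
    simp only [List.foldl_cons, hstep, ih, cartProd, List.flatMap_assoc, List.flatMap_map,
      List.map_flatMap, List.map_map]
    congr 1
    funext ch
    congr 1
    funext x
    simp [Function.comp_def, List.append_assoc]

-- ===== VERDICT (by name: the statement is the Claim_ definition above) =====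
theorem lists_from_primes_gen_spec : Claim_equal_lists_from_primes_gen := by
  intro nums d _ hpre
  obtain ⟨hd, h0⟩ := hpre
  unfold Spec_lists_from_primes_gen lists_from_primes_gen lists_from_primes_gen_alt
  have hd' : ¬ d ≤ 0 := by omega
  simp only [hd', if_false]
  have hall : ∀ pc ∈ (PySem.Dict.counter nums).items, pc.1 ≠ 0 := by
    intro pc hpc
    rw [PySem.Dict.items_counter] at hpc
    obtain ⟨k, hk, rfl⟩ := List.mem_map.mp hpc
    have : k ∈ nums := (PySem.Set.mem_ofList _ _).mp hk
    intro h; exact h0 (h ▸ this)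
  rw [dfs_char d.toNat (by omega) _ hall]
  rw [prod_fold _ (fun chs t => rfl) _ [[]]]
  simp only [List.flatMap_cons, List.flatMap_nil, List.append_nil, List.nil_append,
    List.map_id']
  have htab : ((PySem.Dict.counter nums).items).map (fun pc => compsB pc.2 d.toNat)
      = ((PySem.Dict.counter nums).items).map (fun pc => compsR pc.2 d.toNat) :=
    List.map_congr_left fun pc _ => compsB_eq_compsR pc.2 d.toNat (by omega)
  rw [htab]
  simp only [Bmap, applyComp_eq_mulComp]
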